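-- pv_equiv track=rewrite | github.com/864684766/chocolate | app/rag/processing/media_chunking.py | _group_by_regions
-- ===== SOURCE A (Python) =====
-- from typing import List, Dict, Any
--
-- def _group_by_regions(ocr_results: List[Dict[str, Any]]) -> List[List[Dict[str, Any]]]:
--     """将 OCR 结果按空间位置分组"""
--     # 简单的基于 y 坐标的分组（可以改进为更复杂的空间聚类）
--     sorted_results = sorted(ocr_results, key=lambda x: (x.get("y", 0), x.get("x", 0)))
--
--     regions = []
--     current_region = []
--     last_y = None
--
--     for result in sorted_results:
--         y = result.get("y", 0)
--
--         if last_y is None or abs(y - last_y) < 20:  # 20px 阈值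
--             current_region.append(result)
--         else:
--             if current_region:
--                 regions.append(current_region)
--             current_region = [result]
--
--         last_y = y
--
--     if current_region:
--         regions.append(current_region)
--
--     return regions
-- ===== SOURCE B (Python) =====
-- from typing import List, Dict, Any
--
-- def _group_by_regions(ocr_results: List[Dict[str, Any]]) -> List[List[Dict[str, Any]]]:
--     """Group OCR results into regions: compute break positions, then partition by slicing."""
--     sorted_results = sorted(ocr_results, key=lambda x: (x.get("y", 0), x.get("x", 0)))
--     if not sorted_results:
--         return []
--     ys = [r.get("y", 0) for r in sorted_results]
--     cuts = [i for i in range(1, len(ys)) if abs(ys[i] - ys[i - 1]) >= 20]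
--     return [sorted_results[a:b] for a, b in zip([0] + cuts, cuts + [len(ys)])]
-- ===== Notes on version B (the rewrite author's own statement) =====
-- stated objective: alternative
-- what changed: Replaces A's stateful scan (current_region buffer, last_y, end-of-loop flush) by a compute-then-partition decomposition: one pass over the y-values collects the break indices, and the regions are produced by slicing the sorted list between consecutive boundaries.
import Mathlib
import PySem

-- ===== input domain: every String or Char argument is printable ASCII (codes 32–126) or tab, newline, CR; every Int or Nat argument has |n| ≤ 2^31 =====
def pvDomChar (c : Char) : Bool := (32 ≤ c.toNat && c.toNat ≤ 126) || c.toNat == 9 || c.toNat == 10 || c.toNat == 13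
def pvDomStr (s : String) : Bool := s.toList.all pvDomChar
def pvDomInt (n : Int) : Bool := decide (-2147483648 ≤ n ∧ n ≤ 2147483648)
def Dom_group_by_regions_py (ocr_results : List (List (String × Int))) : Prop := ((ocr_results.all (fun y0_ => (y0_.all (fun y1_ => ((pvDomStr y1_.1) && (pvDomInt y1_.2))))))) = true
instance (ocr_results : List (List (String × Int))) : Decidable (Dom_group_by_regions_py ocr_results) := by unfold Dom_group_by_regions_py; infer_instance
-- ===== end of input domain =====

-- B replaces A's stateful current_region/last_y scan by computing the break indices and slicing
-- the sorted list between consecutive boundaries (alternative decomposition, same cost).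

-- ===== PORT A =====
-- result.get("y", 0) / result.get("x", 0) on the dict (association list)
def pvYOf (r : List (String × Int)) : Int := PySem.Dict.getD (PySem.Dict.mk r) "y" 0
def pvXOf (r : List (String × Int)) : Int := PySem.Dict.getD (PySem.Dict.mk r) "x" 0

-- the body of A's for-loop, state = (regions, current_region, last_y)
def pvStepA (st : List (List (List (String × Int))) × List (List (String × Int)) × Option Int)
    (result : List (String × Int)) :
    List (List (List (String × Int))) × List (List (String × Int)) × Option Int :=
  let y := pvYOf result
  match st.2.2 with
  | none => (st.1, st.2.1 ++ [result], some y)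
  | some ly =>
      if |y - ly| < 20 then (st.1, st.2.1 ++ [result], some y)
      else ((if st.2.1 ≠ [] then st.1 ++ [st.2.1] else st.1), [result], some y)

-- the trailing "if current_region: regions.append(current_region)"
def pvFinA (st : List (List (List (String × Int))) × List (List (String × Int)) × Option Int) :
    List (List (List (String × Int))) :=
  if st.2.1 ≠ [] then st.1 ++ [st.2.1] else st.1

def group_by_regions_py (ocr_results : List (List (String × Int))) : List (List (List (String × Int))) :=
  let sorted_results := PySem.List.sorted2 ocr_results pvYOf pvXOf
  pvFinA (sorted_results.foldl pvStepA ([], [], none))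

-- ===== PORT B =====
def group_by_regions_py_alt (ocr_results : List (List (String × Int))) : List (List (List (String × Int))) :=
  let sorted_results := PySem.List.sorted2 ocr_results pvYOf pvXOf
  if sorted_results = [] then []
  else
    let ys := sorted_results.map pvYOf
    -- ys[i] / ys[i-1]: i ranges over 1..len-1, always in range, so pyGetD is exact here
    let cuts := (PySem.List.pyRange 1 (ys.length : Int) 1).filter
        (fun i => decide (20 ≤ |PySem.List.pyGetD ys i 0 - PySem.List.pyGetD ys (i - 1) 0|))
    (((0 : Int) :: cuts).zip (cuts ++ [(ys.length : Int)])).map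
        (fun p => PySem.List.slice sorted_results (some p.1) (some p.2))

-- ===== PRECONDITION & SPEC =====
def Spec_group_by_regions_py (ocr_results : List (List (String × Int))) (out : List (List (List (String × Int)))) : Prop := out = group_by_regions_py_alt ocr_results
instance (ocr_results : List (List (String × Int))) (out : List (List (List (String × Int)))) : Decidable (Spec_group_by_regions_py ocr_results out) := by unfold Spec_group_by_regions_py; infer_instance

-- ===== CLAIM (what is proved, stated in full; the proofs are below) =====
def Claim_equal_group_by_regions_py : Prop := ∀ (ocr_results : List (List (String × Int))), Dom_group_by_regions_py ocr_results → Spec_group_by_regions_py ocr_results (group_by_regions_py ocr_results)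

-- ===== LEMMAS AND PROOFS =====

-- the recursive "chunking" both sides compute: grp a t = (region containing a, later regions)
def pvGrp (a : List (String × Int)) : List (List (String × Int)) →
    List (List (String × Int)) × List (List (List (String × Int)))
  | [] => ([a], [])
  | b :: t =>
      let p := pvGrp b t
      if |pvYOf b - pvYOf a| < 20 then (a :: p.1, p.2) else ([a], p.1 :: p.2)

def pvChunks : List (List (String × Int)) → List (List (List (String × Int)))
  | [] => []
  | a :: t => (pvGrp a t).1 :: (pvGrp a t).2

-- ---- A-side ----
def pvChunkFrom (cur : List (List (String × Int))) (ly : Int) :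
    List (List (String × Int)) → List (List (List (String × Int)))
  | [] => [cur]
  | a :: t =>
      if |pvYOf a - ly| < 20 then pvChunkFrom (cur ++ [a]) (pvYOf a) t
      else cur :: pvChunkFrom [a] (pvYOf a) t

lemma pvLoopA (s : List (List (String × Int))) :
    ∀ regs cur ly, cur ≠ [] →
      pvFinA (s.foldl pvStepA (regs, cur, some ly)) = regs ++ pvChunkFrom cur ly s := by
  induction s with
  | nil => intro regs cur ly hc; simp [pvFinA, pvChunkFrom, hc]
  | cons a t ih =>
      intro regs cur ly hc
      simp only [List.foldl_cons, pvStepA, pvChunkFrom]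
      by_cases h : |pvYOf a - ly| < 20
      · simp only [h, if_pos]
        exact ih regs (cur ++ [a]) (pvYOf a) (by simp)
      · simp only [h, if_neg, not_false_iff, hc, ne_eq, if_pos]
        rw [ih (regs ++ [cur]) [a] (pvYOf a) (by simp), List.append_assoc]
        rfl

lemma pvChunkFrom_grp : ∀ (t : List (List (String × Int))) a g,
    pvChunkFrom (g ++ [a]) (pvYOf a) t = (g ++ (pvGrp a t).1) :: (pvGrp a t).2 := by
  intro t
  induction t with
  | nil => intro a g; simp [pvChunkFrom, pvGrp]
  | cons b t ih =>
      intro a g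
      simp only [pvChunkFrom, pvGrp]
      by_cases h : |pvYOf b - pvYOf a| < 20
      · rw [if_pos h, if_pos h, ih b (g ++ [a])]
        simp
      · rw [if_neg h, if_neg h]
        have h0 := ih b []
        simp only [List.nil_append] at h0
        rw [h0]

lemma pvA_eq_chunks (xs : List (List (String × Int))) :
    group_by_regions_py xs = pvChunks (PySem.List.sorted2 xs pvYOf pvXOf) := by
  unfold group_by_regions_py
  cases hs : PySem.List.sorted2 xs pvYOf pvXOf with
  | nil => simp [pvFinA, pvChunks]
  | cons a t =>
      simp only [List.foldl_cons, pvStepA, List.nil_append]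
      rw [pvLoopA t [] [a] (pvYOf a) (by simp)]
      have := pvChunkFrom_grp t a []
      simp only [List.nil_append] at this ⊢
      rw [this]
      rfl

-- ---- B-side ----
def pvCuts : List Int → List Nat
  | [] => []
  | [_] => []
  | p :: c :: t => if 20 ≤ |c - p| then 1 :: (pvCuts (c :: t)).map (· + 1) else (pvCuts (c :: t)).map (· + 1)

def pvPairsFrom (start : Nat) : List Nat → Nat → List (Nat × Nat)
  | [], n => [(start, n)]
  | c :: cs, n => (start, c) :: pvPairsFrom c cs n

def pvSliceN (s : List (List (String × Int))) (p : Nat × Nat) : List (List (String × Int)) :=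
  (s.drop p.1).take (p.2 - p.1)

-- shift lemma: slicing a::t with all bounds shifted by one is slicing t
lemma pvPairsFrom_shift (a : List (String × Int)) (t : List (List (String × Int))) :
    ∀ (cs : List Nat) (start n : Nat),
      (pvPairsFrom (start + 1) (cs.map (· + 1)) (n + 1)).map (pvSliceN (a :: t)) =
      (pvPairsFrom start cs n).map (pvSliceN t) := by
  intro cs
  induction cs with
  | nil => intro start n; simp [pvPairsFrom, pvSliceN, Nat.add_sub_add_right]
  | cons c cs ih =>
      intro start n
      simp only [List.map_cons, pvPairsFrom, List.map]
      rw [ih c n]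
      simp [pvSliceN, Nat.add_sub_add_right]

lemma pvSlices_eq_chunks : ∀ (s : List (List (String × Int))), s ≠ [] →
    (pvPairsFrom 0 (pvCuts (s.map pvYOf)) s.length).map (pvSliceN s) = pvChunks s := by
  intro s
  induction s with
  | nil => intro h; exact absurd rfl h
  | cons a t ih =>
      intro _
      cases t with
      | nil => simp [pvCuts, pvPairsFrom, pvSliceN, pvChunks, pvGrp]
      | cons b t' =>
          have ht : (b :: t') ≠ [] := by simp
          have iht := ih ht
          simp only [List.map_cons, pvCuts, pvChunks, pvGrp] at iht ⊢
          by_cases h : |pvYOf b - pvYOf a| < 20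
          · -- no gap: a joins the first region of t
            rw [if_neg (by omega)]
            rw [if_pos h]
            cases hcs : pvCuts (pvYOf b :: t'.map pvYOf) with
            | nil =>
                rw [hcs] at iht
                simp only [pvPairsFrom, List.map] at iht ⊢
                simp only [pvSliceN, List.drop_zero, Nat.sub_zero] at iht ⊢
                simp only [List.take_length] at iht
                have h1 : (b :: t').take (b :: t').length = b :: t' := List.take_length
                -- iht : [b :: t' ...] hmm
                injection iht with h2 h3
                simp [List.take_of_length_le, h2, h3]
            | cons c cs =>
                rw [hcs] at iht
                simp only [pvPairsFrom, List.map_cons, List.map] at iht ⊢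
                injection iht with h2 h3
                simp only [List.length_cons] at h3
                have hsh := pvPairsFrom_shift a (b :: t') (cs) c ((b :: t').length)
                simp only [List.length_cons] at hsh ⊢
                rw [hsh, h3]
                have hfirst : pvSliceN (a :: b :: t') (0, c + 1) = a :: pvSliceN (b :: t') (0, c) := by
                  simp [pvSliceN]
                rw [hfirst, h2]
          · -- gap: a is its own region
            rw [if_pos (by omega)]
            rw [if_neg h]
            simp only [List.length_cons, pvPairsFrom, List.map_cons]
            have hsh := pvPairsFrom_shift a (b :: t') (pvCuts (pvYOf b :: t'.map pvYOf)) 0 ((b :: t').length)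
            rw [show (0:Nat) + 1 = 1 from rfl] at hsh
            simp only [List.length_cons] at hsh iht ⊢
            rw [hsh, iht]
            have hfirst : pvSliceN (a :: b :: t') (0, 1) = [a] := by simp [pvSliceN]
            rw [hfirst]

def pvCastN (k : Nat) : Int := (k : Int)

lemma pvCastN_shift (l : List Nat) :
    (l.map pvCastN).map (· + 1) = (l.map (· + 1)).map pvCastN := by
  simp only [List.map_map]
  apply List.map_congr_left
  intro x _
  simp [pvCastN, Function.comp]

-- bridge: the Int-level cuts of the port are the Nat-level pvCuts
lemma pvRange_shift (n : Int) (hn : 0 ≤ n) :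
    PySem.List.pyRange 2 (n + 2) 1 = (PySem.List.pyRange 1 (n + 1) 1).map (· + 1) := by
  rw [PySem.List.pyRange_one, PySem.List.pyRange_one]
  have h1 : (n + 2 - 2).toNat = n.toNat := by omega
  have h2 : (n + 1 - 1).toNat = n.toNat := by omega
  rw [h1, h2, List.map_map]
  apply List.map_congr_left
  intro k _
  simp; ring

lemma pvCutsI : ∀ (ys : List Int),
    (PySem.List.pyRange 1 (ys.length : Int) 1).filter
        (fun i => decide (20 ≤ |PySem.List.pyGetD ys i 0 - PySem.List.pyGetD ys (i - 1) 0|)) =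
    (pvCuts ys).map pvCastN := by
  intro ys
  match ys with
  | [] => simp [pvCuts, PySem.List.pyRange_one_eq_nil]
  | [y] => simp [pvCuts, PySem.List.pyRange_one_eq_nil]
  | p :: c :: t =>
      have hlen : ((p :: c :: t).length : Int) = (t.length : Int) + 2 := by simp; omega
      rw [hlen]
      rw [PySem.List.pyRange_one_cons (by omega)]
      rw [show (1:Int) + 1 = 2 from rfl]
      rw [pvRange_shift (t.length : Int) (by positivity)]
      rw [List.filter_cons]
      have hc1 : PySem.List.pyGetD (p :: c :: t) (1:Int) 0 = c := by
        simpa using PySem.List.pyGetD_ofNat (xs := p :: c :: t) (n := 1) (d := 0) (by simp)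
      have hc0 : PySem.List.pyGetD (p :: c :: t) ((1:Int) - 1) 0 = p := by
        norm_num
      rw [List.filter_map]
      simp only [Function.comp_def]
      have hshift : ∀ i ∈ PySem.List.pyRange 1 ((t.length : Int) + 1) 1,
          (decide (20 ≤ |PySem.List.pyGetD (p :: c :: t) (i + 1) 0 - PySem.List.pyGetD (p :: c :: t) (i + 1 - 1) 0|)) =
          (decide (20 ≤ |PySem.List.pyGetD (c :: t) i 0 - PySem.List.pyGetD (c :: t) (i - 1) 0|)) := by
        intro i hi
        rw [PySem.List.mem_pyRange_one] at hi
        have h1 : PySem.List.pyGetD (p :: c :: t) (i + 1) 0 = PySem.List.pyGetD (c :: t) i 0 := by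
          rw [PySem.List.pyGetD_eq_getElem (p :: c :: t) 0 (by omega) (by simp; omega),
              PySem.List.pyGetD_eq_getElem (c :: t) 0 (by omega) (by simp; omega)]
          have hq : (i + 1).toNat = i.toNat + 1 := by omega
          simp only [hq, List.getElem_cons_succ]
        have h2 : PySem.List.pyGetD (p :: c :: t) (i + 1 - 1) 0 = PySem.List.pyGetD (c :: t) (i - 1) 0 := by
          rw [PySem.List.pyGetD_eq_getElem (p :: c :: t) 0 (by omega) (by simp; omega),
              PySem.List.pyGetD_eq_getElem (c :: t) 0 (by omega) (by simp; omega)]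
          have hq : (i + 1 - 1).toNat = (i - 1).toNat + 1 := by omega
          simp only [hq, List.getElem_cons_succ]
        rw [h1, h2]
      rw [List.filter_congr hshift]
      have hrec := pvCutsI (c :: t)
      simp only [List.length_cons] at hrec
      push_cast at hrec
      rw [hrec]
      simp only [pvCuts]
      by_cases h : 20 ≤ |c - p|
      · rw [if_pos (by rw [hc1, hc0]; simpa using h)]
        rw [if_pos h]
        rw [List.map_cons, ← pvCastN_shift]
        simp [pvCastN]
      · rw [if_neg (by rw [hc1, hc0]; simpa using h)]
        rw [if_neg h]
        rw [← pvCastN_shift]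

-- bridge: zip of cast boundary lists is the cast of pvPairsFrom
lemma pvZip_pairs : ∀ (cs : List Nat) (start n : Nat),
    (((start : Int) :: cs.map pvCastN).zip (cs.map pvCastN ++ [(n : Int)])) =
    (pvPairsFrom start cs n).map (fun p => (pvCastN p.1, pvCastN p.2)) := by
  intro cs
  induction cs with
  | nil => intro start n; simp [pvPairsFrom, pvCastN]
  | cons c cs ih =>
      intro start n
      simp only [List.map_cons, List.cons_append, List.zip_cons_cons, pvPairsFrom]
      rw [show pvCastN c = (c : Int) from rfl, show pvCastN start = (start : Int) from rfl]
      rw [ih c n]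

lemma pvB_eq_chunks (xs : List (List (String × Int))) :
    group_by_regions_py_alt xs = pvChunks (PySem.List.sorted2 xs pvYOf pvXOf) := by
  unfold group_by_regions_py_alt
  cases hs : PySem.List.sorted2 xs pvYOf pvXOf with
  | nil => simp [pvChunks]
  | cons a t =>
      simp only [reduceCtorEq, ite_false]
      have hcuts := pvCutsI ((a :: t).map pvYOf)
      rw [hcuts]
      simp only [List.length_map]
      rw [show (0:Int) = ((0:Nat):Int) from rfl]
      rw [pvZip_pairs (pvCuts ((a :: t).map pvYOf)) 0 ((a :: t).length)]
      rw [List.map_map]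
      rw [← pvSlices_eq_chunks (a :: t) (by simp)]
      apply List.map_congr_left
      intro p _
      simp only [Function.comp_apply, pvCastN]
      rw [PySem.List.slice_natCast]
      rfl

-- ===== VERDICT (by name: the statement is the Claim_ definition above) =====
theorem group_by_regions_py_spec : Claim_equal_group_by_regions_py := by
  intro xs _
  unfold Spec_group_by_regions_py
  rw [pvA_eq_chunks, pvB_eq_chunks]
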